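-- pv_equiv track=rewrite | github.com/vapor-ware/synse-server | synse/emulator/plc/devicebus_emulator.py | transform_raw
-- ===== SOURCE A (Python) =====
-- SEQUENCE_NUMBER_SENTINEL = 999      # when encountered, replace with the desired sequence number
--
-- CHECKSUM_SENTINEL = 1000            # mask for checksum, remainder is offset of starting byte of checksum
--
-- def generate_emulator_checksum(raw_bytes, start, end):
--     """ Convenience method for generating a checksum over a raw byte range.
--     Redundant to what is in devicebus, but added in this form for simplicity.
--
--     Args:
--         raw_bytes (list): the byte buffer to compute checksum for.
--         start (int): the starting index of the buffer.
--         end (int): the ending index of the buffer to checksum.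
--
--     Returns:
--         int: the checksum over the specified buffer range.
--     """
--     checksum = 0
--     for x in raw_bytes[start:end]:
--         checksum = checksum + x
--     twoscomp = ((~checksum) + 1) & 0xFF
--     return twoscomp
--
-- def transform_raw(raw_bytes, seq_no):
--     """ Transforms raw_bytes into a proper byte stream for sending over the bus.
--     This includes replacing the SEQ_NO_SENTINEL with the sequence number, and also
--     computing the correct checksum if the CK_SENTINEL is present.
--
--     Args:
--         raw_bytes (list): the raw byte stream from the emulator config.
--         seq_no (int): the sequence number to drop in.
--
--     Returns:
--         list: a transformed list of bytes based on the input.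
--     """
--     # copy bytes so we do not stomp the emulator config for later uses of the
--     # same bytes (otherwise, on the first use, the sentinels are removed for the lifetime of the emulator)
--     new_bytes = list(raw_bytes)
--     for i, x in enumerate(new_bytes):
--         if x == SEQUENCE_NUMBER_SENTINEL:
--             new_bytes[i] = seq_no
--         elif CHECKSUM_SENTINEL <= x <= CHECKSUM_SENTINEL + 255:
--             new_bytes[i] = generate_emulator_checksum(new_bytes, x - CHECKSUM_SENTINEL, i)
--     return new_bytes
-- ===== SOURCE B (Python) =====
-- SEQUENCE_NUMBER_SENTINEL = 999
-- CHECKSUM_SENTINEL = 1000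
--
-- def transform_raw(raw_bytes, seq_no):
--     out = []
--     prefix = [0]          # prefix[k] == sum(out[:k]); running prefix sums of the transformed bytes
--     run = 0               # == prefix[-1]
--     for x in raw_bytes:
--         if x == SEQUENCE_NUMBER_SENTINEL:
--             y = seq_no
--         elif CHECKSUM_SENTINEL <= x <= CHECKSUM_SENTINEL + 255:
--             s = x - CHECKSUM_SENTINEL
--             y = (prefix[s] - run) % 256 if s < len(prefix) else 0
--         else:
--             y = x
--         out.append(y)
--         run += y
--         prefix.append(run)
--     return out
-- ===== Notes on version B (the rewrite author's own statement) =====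
-- stated objective: alternative
-- what changed: Instead of A's in-place rewrite that re-scans a slice of the buffer for every checksum sentinel, B does one pass maintaining running prefix sums of the transformed bytes, so each checksum is a subtraction; it avoids A's worst-case quadratic re-scans, though on typical sentinel-sparse inputs it is not measurably faster.
import Mathlib
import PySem

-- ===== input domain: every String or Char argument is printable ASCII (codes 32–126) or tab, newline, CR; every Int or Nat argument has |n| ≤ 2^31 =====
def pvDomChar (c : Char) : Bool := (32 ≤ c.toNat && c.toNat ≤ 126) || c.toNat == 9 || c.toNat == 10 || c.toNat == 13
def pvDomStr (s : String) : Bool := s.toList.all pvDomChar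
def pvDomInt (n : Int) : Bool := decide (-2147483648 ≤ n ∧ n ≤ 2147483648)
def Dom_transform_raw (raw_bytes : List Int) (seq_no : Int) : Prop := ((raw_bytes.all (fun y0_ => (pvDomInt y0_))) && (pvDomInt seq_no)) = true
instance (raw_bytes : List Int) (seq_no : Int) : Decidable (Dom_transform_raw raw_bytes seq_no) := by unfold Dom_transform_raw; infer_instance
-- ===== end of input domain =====

-- B replaces A's in-place rewrite with repeated checksum slice scans by one pass that
-- keeps running prefix sums of the transformed bytes, each checksum being a subtraction.

-- ===== PORT A =====
-- `((~checksum) + 1) & 0xFF` == `(-checksum) mod 256`, exact for every int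
def generate_emulator_checksum (raw_bytes : List Int) (start e : Int) : Int :=
  let checksum := (PySem.List.slice raw_bytes (some start) (some e)).foldl (fun c x => c + x) 0
  PySem.Int.mod ((-checksum - 1) + 1) 256

-- the `for i, x in enumerate(new_bytes)` loop with in-place writes `new_bytes[i] = …`
def transformGoA (seq_no : Int) (nb : List Int) (i : Nat) : List Int :=
  if h : i < nb.length then
    let x := nb[i]
    if x = 999 then transformGoA seq_no (nb.set i seq_no) (i + 1)
    else if 1000 ≤ x ∧ x ≤ 1255 then
      transformGoA seq_no (nb.set i (generate_emulator_checksum nb (x - 1000) (i : Int))) (i + 1)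
    else transformGoA seq_no nb (i + 1)
  else nb
termination_by nb.length - i
decreasing_by all_goals simp_all [List.length_set]; omega

def transform_raw (raw_bytes : List Int) (seq_no : Int) : List Int :=
  transformGoA seq_no raw_bytes 0

-- ===== PORT B =====
-- state = (out, prefix, run); `prefix[s]` is a plain non-negative in-range index here
def altStep (seq_no : Int) (st : List Int × List Int × Int) (x : Int) : List Int × List Int × Int :=
  let out := st.1; let pre := st.2.1; let run := st.2.2
  let y : Int :=
    if x = 999 then seq_no
    else if 1000 ≤ x ∧ x ≤ 1255 then
      let s := x - 1000
      if s < (pre.length : Int) then PySem.Int.mod (pre.getD s.toNat 0 - run) 256 else 0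
    else x
  (out ++ [y], pre ++ [run + y], run + y)

def transform_raw_alt (raw_bytes : List Int) (seq_no : Int) : List Int :=
  (raw_bytes.foldl (altStep seq_no) ([], [0], 0)).1

-- ===== PRECONDITION & SPEC =====
def Spec_transform_raw (raw_bytes : List Int) (seq_no : Int) (out : List Int) : Prop := out = transform_raw_alt raw_bytes seq_no
instance (raw_bytes : List Int) (seq_no : Int) (out : List Int) : Decidable (Spec_transform_raw raw_bytes seq_no out) := by unfold Spec_transform_raw; infer_instance

-- ===== CLAIM (what is proved, stated in full; the proofs are below) =====
def Claim_equal_transform_raw : Prop := ∀ (raw_bytes : List Int) (seq_no : Int), Dom_transform_raw raw_bytes seq_no → Spec_transform_raw raw_bytes seq_no (transform_raw raw_bytes seq_no)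

-- ===== LEMMAS AND PROOFS =====

-- common model: the transformed value of x given the already-transformed prefix acc
def trStep (seq_no : Int) (acc : List Int) (x : Int) : Int :=
  if x = 999 then seq_no
  else if 1000 ≤ x ∧ x ≤ 1255 then
    PySem.Int.mod (-((acc.drop (x - 1000).toNat).sum)) 256
  else x

def trRun (seq_no : Int) (acc : List Int) : List Int → List Int
  | [] => acc
  | x :: rest => trRun seq_no (acc ++ [trStep seq_no acc x]) rest

-- prefix sums of acc, including the empty one
def preOf (acc : List Int) : List Int :=
  (List.range (acc.length + 1)).map (fun k => (acc.take k).sum)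

theorem set_append_len (acc : List Int) (x y : Int) (rest : List Int) :
    (acc ++ x :: rest).set acc.length y = acc ++ y :: rest := by
  induction acc with
  | nil => rfl
  | cons a t ih => simp [ih]

theorem goA_eq_trRun (seq_no : Int) : ∀ (rest acc : List Int),
    transformGoA seq_no (acc ++ rest) acc.length = trRun seq_no acc rest := by
  intro rest
  induction rest with
  | nil => intro acc; rw [transformGoA]; simp [trRun]
  | cons x rest ih =>
    intro acc
    rw [transformGoA]
    have hlt : acc.length < (acc ++ x :: rest).length := by simp
    have hx : (acc ++ x :: rest)[acc.length] = x := by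
      simp [List.getElem_append_right]
    rw [dif_pos hlt]
    simp only [hx]
    have hnext (y : Int) : acc ++ y :: rest = (acc ++ [y]) ++ rest := by simp
    by_cases h9 : x = 999
    · rw [if_pos h9, set_append_len, hnext, show acc.length + 1 = (acc ++ [seq_no]).length from by simp]
      rw [ih (acc ++ [seq_no])]
      simp [trRun, trStep, h9]
    · rw [if_neg h9]
      by_cases hc : 1000 ≤ x ∧ x ≤ 1255
      · rw [if_pos hc, set_append_len]
        have hs0 : (0 : Int) ≤ x - 1000 := by omega
        have hchk : generate_emulator_checksum (acc ++ x :: rest) (x - 1000) (acc.length : Int)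
            = trStep seq_no acc x := by
          unfold generate_emulator_checksum trStep
          rw [if_neg h9, if_pos hc]
          rw [PySem.List.slice_toNat]
          simp only [Int.toNat_natCast]
          have : ((acc ++ x :: rest).drop (x - 1000).toNat).take (acc.length - (x - 1000).toNat)
              = acc.drop (x - 1000).toNat := by
            by_cases hle : (x - 1000).toNat ≤ acc.length
            · rw [List.drop_append_of_le_length hle]
              rw [List.take_append_of_le_length (by simp)]
              simp
            · rw [show acc.length - (x - 1000).toNat = 0 from by omega, List.take_zero]
              exact (List.drop_eq_nil_iff.2 (by omega)).symm
          rw [this]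
          have hsum : ∀ (l : List Int), l.foldl (fun c x => c + x) 0 = l.sum := by
            intro l; rw [List.sum_eq_foldl]
          rw [hsum]; ring_nf
          all_goals omega
        rw [hchk, hnext, show acc.length + 1 = (acc ++ [trStep seq_no acc x]).length from by simp]
        rw [ih (acc ++ [trStep seq_no acc x])]
        simp [trRun]
      · rw [if_neg hc]
        have hxv : x = trStep seq_no acc x := by simp [trStep, h9, hc]
        rw [hnext, show acc.length + 1 = (acc ++ [x]).length from by simp]
        conv_lhs => rw [hxv]
        rw [ih (acc ++ [trStep seq_no acc x]), trRun]

theorem preOf_length (acc : List Int) : (preOf acc).length = acc.length + 1 := by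
  simp [preOf]

theorem preOf_getD (acc : List Int) (k : Nat) (hk : k ≤ acc.length) :
    (preOf acc).getD k 0 = (acc.take k).sum := by
  have hk' : k < (preOf acc).length := by rw [preOf_length]; omega
  rw [List.getD_eq_getElem _ _ hk']
  simp [preOf]

theorem preOf_append (acc : List Int) (y : Int) :
    preOf acc ++ [acc.sum + y] = preOf (acc ++ [y]) := by
  unfold preOf
  conv_rhs => rw [show (acc ++ [y]).length + 1 = (acc.length + 1) + 1 from by simp,
    List.range_succ, List.map_append]
  congr 1
  · apply List.map_congr_left
    intro k hk
    have hkle : k ≤ acc.length := by simp at hk; omega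
    rw [List.take_append_of_le_length hkle]
  · simp

theorem altStep_eq (seq_no : Int) (acc : List Int) (x : Int) :
    altStep seq_no (acc, preOf acc, acc.sum) x
      = (acc ++ [trStep seq_no acc x], preOf (acc ++ [trStep seq_no acc x]),
         (acc ++ [trStep seq_no acc x]).sum) := by
  have hy : (if x = 999 then seq_no
      else if 1000 ≤ x ∧ x ≤ 1255 then
        if (x - 1000) < ((preOf acc).length : Int) then
          PySem.Int.mod ((preOf acc).getD (x - 1000).toNat 0 - acc.sum) 256
        else 0
      else x) = trStep seq_no acc x := by
    unfold trStep
    by_cases h9 : x = 999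
    · simp [h9]
    · rw [if_neg h9, if_neg h9]
      by_cases hc : 1000 ≤ x ∧ x ≤ 1255
      · rw [if_pos hc, if_pos hc]
        rw [preOf_length]
        by_cases hin : (x - 1000) < ((acc.length + 1 : Nat) : Int)
        · rw [if_pos hin]
          have hk : (x - 1000).toNat ≤ acc.length := by omega
          rw [preOf_getD acc _ hk]
          congr 1
          have := List.sum_take_add_sum_drop acc (x - 1000).toNat
          omega
        · rw [if_neg hin]
          rw [List.drop_eq_nil_iff.2 (by omega)]
          simp [PySem.Int.mod]
      · simp [hc]
  unfold altStep
  simp only []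
  rw [hy]
  rw [preOf_append, List.sum_append]
  simp
theorem foldB_eq (seq_no : Int) : ∀ (rest acc : List Int),
    rest.foldl (altStep seq_no) (acc, preOf acc, acc.sum)
      = (trRun seq_no acc rest, preOf (trRun seq_no acc rest), (trRun seq_no acc rest).sum) := by
  intro rest
  induction rest with
  | nil => intro acc; simp [trRun]
  | cons x rest ih =>
    intro acc
    rw [List.foldl_cons, altStep_eq, ih, trRun]

-- ===== VERDICT (by name: the statement is the Claim_ definition above) =====
theorem transform_raw_spec : Claim_equal_transform_raw := by
  intro raw_bytes seq_no _
  unfold Spec_transform_raw transform_raw transform_raw_alt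
  have hA := goA_eq_trRun seq_no raw_bytes []
  simp only [List.nil_append, List.length_nil] at hA
  have hpre : preOf [] = [0] := by simp [preOf]
  have hB := foldB_eq seq_no raw_bytes []
  rw [hpre] at hB
  simp only [List.sum_nil] at hB
  rw [hA, hB]
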